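-- pv_equiv track=rewrite | github.com/rthompson-bdai/ibrl_forcelearning | mw_main/ibrl_data_graph.py | sort_data_by_factor
-- ===== SOURCE A (Python) =====
-- def get_factor(filename):
--     return filename[filename.find('_') + 1:]
--
-- def sort_data_by_factor(results_dict):
--     by_factor = {}
--     subdir_names = results_dict.keys()
--     for name in subdir_names:
--         factor = get_factor(name)
--         # if get_env(name) in ['handle-pull', 'lever-pull', 'pick-place']:
--         #     continue
--
--         if factor in by_factor.keys():
--             by_factor[factor][name] = results_dict[name]
--         else:
--             by_factor[factor] = {name: results_dict[name]}
--     return by_factor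
-- ===== SOURCE B (Python) =====
-- def get_factor(filename):
--     return filename[filename.find('_') + 1:]
--
--
-- def sort_data_by_factor(results_dict):
--     # Two passes: compute each name's factor once up front, collect the distinct
--     # factors in first-appearance order, then build each factor's group by one
--     # filtering comprehension over the precomputed triples.
--     pairs = [(get_factor(name), name, value) for name, value in results_dict.items()]
--     factors = dict.fromkeys(factor for factor, _, _ in pairs)
--     return {factor: {name: value for f, name, value in pairs if f == factor}
--             for factor in factors}
-- ===== Notes on version B (the rewrite author's own statement) =====
-- stated objective: idiomatic
-- what changed: Replaces the one-pass scatter-into-buckets (dict-of-dicts built incrementally with a membership test and a dict lookup per key) by a comprehension pipeline: precompute (factor, name, value) triples, dedup the factors in first-appearance order, then build each group with one filter over the triples.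
import Mathlib
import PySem

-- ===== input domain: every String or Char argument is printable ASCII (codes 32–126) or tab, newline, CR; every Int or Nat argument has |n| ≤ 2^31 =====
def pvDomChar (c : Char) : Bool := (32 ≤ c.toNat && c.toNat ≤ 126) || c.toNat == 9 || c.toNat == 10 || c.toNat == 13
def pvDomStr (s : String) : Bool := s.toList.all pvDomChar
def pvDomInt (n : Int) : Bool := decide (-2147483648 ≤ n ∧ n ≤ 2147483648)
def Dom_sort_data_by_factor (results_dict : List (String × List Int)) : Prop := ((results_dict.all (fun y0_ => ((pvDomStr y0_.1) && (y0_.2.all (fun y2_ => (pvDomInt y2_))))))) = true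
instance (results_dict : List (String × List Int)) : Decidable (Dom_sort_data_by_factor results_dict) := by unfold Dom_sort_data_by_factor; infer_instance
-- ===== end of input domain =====

-- B replaces A's one-pass scatter into a dict of dicts by a dedup-the-factors pass
-- followed by one filter per factor (idiomatic comprehension style, same result).


-- ===== PORT A =====
-- get_factor(filename) = filename[filename.find('_') + 1:]   (identical helper in both sources)
def get_factor (filename : String) : String :=
  PySem.Str.slice filename (some (PySem.Str.find filename "_" + 1)) none

-- A: by_factor = {}; for name in results_dict.keys(): factor = get_factor(name);
--    if factor in by_factor: by_factor[factor][name] = results_dict[name]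
--    else: by_factor[factor] = {name: results_dict[name]}
-- results_dict[name] is ported as (Dict.mk results_dict).getD name [] (it cannot fail:
-- name comes from the keys); the in-place mutation of the inner dict is ported as
-- re-inserting the updated inner dict (insert keeps the position of an existing key).
def sort_data_by_factor (results_dict : List (String × List Int)) : List (String × List (String × List Int)) :=
  (results_dict.foldl
    (fun (d : PySem.Dict String (PySem.Dict String (List Int))) e =>
      if d.contains (get_factor e.1) then
        d.insert (get_factor e.1)
          ((d.getD (get_factor e.1) PySem.Dict.empty).insert e.1
            ((PySem.Dict.mk results_dict).getD e.1 []))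
      else
        d.insert (get_factor e.1)
          ((PySem.Dict.empty : PySem.Dict String (List Int)).insert e.1
            ((PySem.Dict.mk results_dict).getD e.1 [])))
    PySem.Dict.empty).items.map (fun p => (p.1, p.2.items))

-- ===== PORT B =====
-- B: pairs = [(get_factor(name), name, value) for name, value in results_dict.items()];
--    factors = dict.fromkeys(factor for factor, _, _ in pairs)  (ordered dedup);
--    {factor: {name: value for f, name, value in pairs if f == factor} for factor in factors}
def sort_data_by_factor_alt (results_dict : List (String × List Int)) : List (String × List (String × List Int)) :=
  (PySem.List.dedup ((results_dict.map (fun e => (get_factor e.1, e.1, e.2))).map (fun t => t.1))).map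
    (fun factor =>
      (factor, ((results_dict.map (fun e => (get_factor e.1, e.1, e.2))).filter
        (fun t => t.1 == factor)).map (fun t => (t.2.1, t.2.2))))

-- ===== PRECONDITION & SPEC =====
-- Pre_ excludes association lists with duplicate keys: a Python dict cannot hold
-- duplicate keys, so such lists correspond to no input the Python function receives.
def Pre_sort_data_by_factor (results_dict : List (String × List Int)) : Prop :=
  (results_dict.map Prod.fst).Nodup
instance (results_dict : List (String × List Int)) : Decidable (Pre_sort_data_by_factor results_dict) := by
  unfold Pre_sort_data_by_factor; infer_instance

def pvWitness_sort_data_by_factor : (List (String × List Int)) :=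
  [("cheese_0.5", [1, 2]), ("door_0.5", [3]), ("door_1.0", [])]

def Spec_sort_data_by_factor (results_dict : List (String × List Int)) (out : List (String × List (String × List Int))) : Prop := out = sort_data_by_factor_alt results_dict
instance (results_dict : List (String × List Int)) (out : List (String × List (String × List Int))) : Decidable (Spec_sort_data_by_factor results_dict out) := by unfold Spec_sort_data_by_factor; infer_instance

-- ===== CLAIM (what is proved, stated in full; the proofs are below) =====
def Claim_equal_sort_data_by_factor : Prop := ∀ (results_dict : List (String × List Int)), Dom_sort_data_by_factor results_dict → Pre_sort_data_by_factor results_dict → Spec_sort_data_by_factor results_dict (sort_data_by_factor results_dict)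

-- ===== LEMMAS AND PROOFS =====

-- The grouped table B describes, for a processed prefix p and an arbitrary key function g.
def pvGroups (g : String × List Int → String) (p : List (String × List Int)) :
    List (String × PySem.Dict String (List Int)) :=
  (PySem.List.dedup (p.map g)).map
    (fun f => (f, PySem.Dict.mk (p.filter (fun e => g e == f))))

theorem pvDedup_append {xs : List String} (x : String) :
    PySem.List.dedup (xs ++ [x]) = PySem.Set.add (PySem.List.dedup xs) x := by
  show List.foldl PySem.Set.add [] (xs ++ [x])
      = PySem.Set.add (List.foldl PySem.Set.add [] xs) x
  rw [List.foldl_append]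
  rfl

theorem pvDedup_append_of_mem {xs : List String} {x : String} (h : x ∈ xs) :
    PySem.List.dedup (xs ++ [x]) = PySem.List.dedup xs := by
  rw [pvDedup_append]
  unfold PySem.Set.add PySem.Set.contains
  simp
  simpa using h

theorem pvDedup_append_of_not_mem {xs : List String} {x : String} (h : x ∉ xs) :
    PySem.List.dedup (xs ++ [x]) = PySem.List.dedup xs ++ [x] := by
  rw [pvDedup_append]
  unfold PySem.Set.add PySem.Set.contains
  simp
  simpa using h

theorem pvContains_groups (g : String × List Int → String) (p : List (String × List Int))
    (f : String) :
    (PySem.Dict.mk (pvGroups g p)).contains f = decide (f ∈ p.map g) := by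
  rw [PySem.Dict.contains_mk]
  simp only [pvGroups, List.any_map, Function.comp_def]
  by_cases h : f ∈ p.map g
  · simp only [h, decide_true]
    exact List.any_eq_true.2 ⟨f, (PySem.List.mem_dedup (p.map g) f).2 h, by simp⟩
  · simp only [h, decide_false]
    refine List.any_eq_false.2 (fun x hx => ?_)
    simp only [beq_iff_eq]
    intro hxf
    exact h ((PySem.List.mem_dedup (p.map g) f).1 (hxf ▸ hx))

-- One step of A's loop turns the grouped table for p into the grouped table for p ++ [e].
theorem pvStep (g : String × List Int → String) (p : List (String × List Int))
    (e : String × List Int) (hfresh : e.1 ∉ p.map Prod.fst) :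
    (if (PySem.Dict.mk (pvGroups g p)).contains (g e) then
      (PySem.Dict.mk (pvGroups g p)).insert (g e)
        (((PySem.Dict.mk (pvGroups g p)).getD (g e) PySem.Dict.empty).insert e.1 e.2)
    else
      (PySem.Dict.mk (pvGroups g p)).insert (g e)
        ((PySem.Dict.empty : PySem.Dict String (List Int)).insert e.1 e.2))
    = PySem.Dict.mk (pvGroups g (p ++ [e])) := by
  have hkeysnd : ((pvGroups g p).map Prod.fst).Nodup := by
    have : (pvGroups g p).map Prod.fst = PySem.List.dedup (p.map g) := by
      simp [pvGroups, Function.comp_def]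
    rw [this]
    exact PySem.List.nodup_dedup _
  by_cases hmem : g e ∈ p.map g
  · -- factor already present: its inner dict gains (e.1, e.2) at the end
    have hcont : (PySem.Dict.mk (pvGroups g p)).contains (g e) = true := by
      rw [pvContains_groups]; simpa using hmem
    have hinner : (PySem.Dict.mk (pvGroups g p)).getD (g e) PySem.Dict.empty
        = PySem.Dict.mk (p.filter (fun e' => g e' == g e)) := by
      apply PySem.Dict.getD_of_mem_items _ _ hkeysnd
      show _ ∈ pvGroups g p
      simp only [pvGroups, List.mem_map]
      exact ⟨g e, (PySem.List.mem_dedup (p.map g) (g e)).2 hmem, rfl⟩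
    have hinnercont : (PySem.Dict.mk (p.filter (fun e' => g e' == g e))).contains e.1 = false := by
      rw [PySem.Dict.contains_mk]
      refine List.any_eq_false.2 (fun q hq => ?_)
      simp only [beq_iff_eq]
      intro hq1
      exact hfresh (List.mem_map.2 ⟨q, List.mem_of_mem_filter hq, hq1⟩)
    rw [hcont, if_pos rfl, hinner]
    apply PySem.Dict.ext
    rw [PySem.Dict.items_insert_of_contains _ _ hcont]
    show (pvGroups g p).map _ = pvGroups g (p ++ [e])
    simp only [pvGroups, List.map_append, List.map_cons, List.map_nil,
      pvDedup_append_of_mem hmem, List.map_map]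
    apply List.map_congr_left
    intro f _
    by_cases hf : f = g e
    · subst hf
      simp only [Function.comp_apply]
      rw [if_pos (by simp : ((g e == g e) = true))]
      have hfe : (p ++ [e]).filter (fun e' => g e' == g e)
          = p.filter (fun e' => g e' == g e) ++ [e] := by
        simp [List.filter_append, List.filter]
      rw [hfe]
      have hins : ((PySem.Dict.mk (p.filter (fun e' => g e' == g e))).insert e.1 e.2)
          = PySem.Dict.mk (p.filter (fun e' => g e' == g e) ++ [(e.1, e.2)]) := by
        apply PySem.Dict.ext
        rw [PySem.Dict.items_insert_of_not_contains _ _ hinnercont]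
      rw [hins]
    · simp only [Function.comp_apply]
      rw [if_neg (by simpa using hf)]
      have : (p ++ [e]).filter (fun e' => g e' == f) = p.filter (fun e' => g e' == f) := by
        simp [List.filter_append, List.filter, show (g e == f) = false by
          simpa using fun h => hf h.symm]
      rw [this]
  · -- new factor: a fresh singleton group is appended
    have hcont : (PySem.Dict.mk (pvGroups g p)).contains (g e) = false := by
      rw [pvContains_groups]; simpa using hmem
    rw [hcont, if_neg (by simp)]
    apply PySem.Dict.ext
    rw [PySem.Dict.items_insert_of_not_contains _ _ hcont]
    show pvGroups g p ++ _ = pvGroups g (p ++ [e])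
    simp only [pvGroups, List.map_append, List.map_cons, List.map_nil,
      pvDedup_append_of_not_mem hmem]
    congr 1
    · apply List.map_congr_left
      intro f hf
      have hne : ¬ (g e = f) := by
        intro h
        exact hmem ((PySem.List.mem_dedup (p.map g) (g e)).1 (h ▸ hf))
      have : (p ++ [e]).filter (fun e' => g e' == f) = p.filter (fun e' => g e' == f) := by
        simp [List.filter_append, List.filter, show (g e == f) = false by simpa using hne]
      rw [this]
    · have hfilter : (p ++ [e]).filter (fun e' => g e' == g e) = [e] := by
        have h0 : p.filter (fun e' => g e' == g e) = [] := by
          rw [List.filter_eq_nil_iff]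
          intro q hq hqe
          exact hmem (List.mem_map.2 ⟨q, hq, by simpa using hqe⟩)
        simp [List.filter_append, h0, List.filter]
      rw [hfilter]
      have : (PySem.Dict.empty : PySem.Dict String (List Int)).contains e.1 = false :=
        PySem.Dict.contains_empty e.1
      have hitems : ((PySem.Dict.empty : PySem.Dict String (List Int)).insert e.1 e.2).items
          = [(e.1, e.2)] := by
        rw [PySem.Dict.items_insert_of_not_contains _ _ this]
        rfl
      rw [show ((PySem.Dict.empty : PySem.Dict String (List Int)).insert e.1 e.2)
          = PySem.Dict.mk [(e.1, e.2)] from PySem.Dict.ext hitems]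

-- A's whole loop computes the grouped table of the processed list.
theorem pvLoop (g : String × List Int → String) :
    ∀ (l p : List (String × List Int)), ((p ++ l).map Prod.fst).Nodup →
    l.foldl
      (fun d e =>
        if d.contains (g e) then
          d.insert (g e) ((d.getD (g e) PySem.Dict.empty).insert e.1 e.2)
        else
          d.insert (g e) ((PySem.Dict.empty : PySem.Dict String (List Int)).insert e.1 e.2))
      (PySem.Dict.mk (pvGroups g p))
    = PySem.Dict.mk (pvGroups g (p ++ l)) := by
  intro l
  induction l with
  | nil => intro p _; simp
  | cons e l ih =>
    intro p hnd
    have hnd' : (p.map Prod.fst ++ e.1 :: l.map Prod.fst).Nodup := by simpa using hnd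
    have hmid : (e.1 :: (p.map Prod.fst ++ l.map Prod.fst)).Nodup := List.nodup_middle.1 hnd'
    have hfresh : e.1 ∉ p.map Prod.fst := fun hm =>
      (List.nodup_cons.1 hmid).1 (List.mem_append_left _ hm)
    rw [List.foldl_cons, pvStep g p e hfresh]
    have := ih (p ++ [e]) (by simpa using hnd)
    simpa using this

-- results_dict[name] is name's own value when the keys are distinct.
theorem pvLookup (results_dict : List (String × List Int))
    (hnd : (results_dict.map Prod.fst).Nodup) (e : String × List Int)
    (he : e ∈ results_dict) :
    (PySem.Dict.mk results_dict).getD e.1 [] = e.2 := by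
  apply PySem.Dict.getD_of_mem_items
  · simpa using he
  · simpa [PySem.Dict.keys_mk] using hnd

-- ===== VERDICT (by name: the statement is the Claim_ definition above) =====
theorem sort_data_by_factor_spec : Claim_equal_sort_data_by_factor := by
  unfold Claim_equal_sort_data_by_factor
  intro rd _ hpre
  unfold Spec_sort_data_by_factor sort_data_by_factor sort_data_by_factor_alt
  have hpre' : (rd.map Prod.fst).Nodup := hpre
  have hcongr : ∀ (d : PySem.Dict String (PySem.Dict String (List Int)))
      (e : String × List Int), e ∈ rd →
      (if d.contains (get_factor e.1) then
        d.insert (get_factor e.1)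
          ((d.getD (get_factor e.1) PySem.Dict.empty).insert e.1
            ((PySem.Dict.mk rd).getD e.1 []))
      else
        d.insert (get_factor e.1)
          ((PySem.Dict.empty : PySem.Dict String (List Int)).insert e.1
            ((PySem.Dict.mk rd).getD e.1 [])))
      = (if d.contains (get_factor e.1) then
        d.insert (get_factor e.1) ((d.getD (get_factor e.1) PySem.Dict.empty).insert e.1 e.2)
      else
        d.insert (get_factor e.1)
          ((PySem.Dict.empty : PySem.Dict String (List Int)).insert e.1 e.2)) :=
    fun d e he => by rw [pvLookup rd hpre' e he]
  have hfold : rd.foldl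
      (fun (d : PySem.Dict String (PySem.Dict String (List Int))) e =>
        if d.contains (get_factor e.1) then
          d.insert (get_factor e.1)
            ((d.getD (get_factor e.1) PySem.Dict.empty).insert e.1
              ((PySem.Dict.mk rd).getD e.1 []))
        else
          d.insert (get_factor e.1)
            ((PySem.Dict.empty : PySem.Dict String (List Int)).insert e.1
              ((PySem.Dict.mk rd).getD e.1 [])))
      PySem.Dict.empty
      = rd.foldl
      (fun (d : PySem.Dict String (PySem.Dict String (List Int))) e =>
        if d.contains (get_factor e.1) then
          d.insert (get_factor e.1) ((d.getD (get_factor e.1) PySem.Dict.empty).insert e.1 e.2)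
        else
          d.insert (get_factor e.1)
            ((PySem.Dict.empty : PySem.Dict String (List Int)).insert e.1 e.2))
      PySem.Dict.empty := PySem.List.foldl_congr_mem _ _ _ _ hcongr
  rw [hfold]
  have hloop := pvLoop (fun e => get_factor e.1) rd [] (by simpa using hpre')
  simp only [List.nil_append] at hloop
  rw [show (PySem.Dict.empty : PySem.Dict String (PySem.Dict String (List Int)))
      = PySem.Dict.mk (pvGroups (fun e => get_factor e.1) []) from rfl]
  rw [hloop]
  simp only [pvGroups, List.map_map, Function.comp_def, List.filter_map]
  simp
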